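-- pv_equiv track=rewrite | github.com/JoonyeolDev/codingtest | Programers/lv0/빈_배열에_추가,삭제하기.py | solution
-- ===== SOURCE A (Python) =====
-- def solution(arr, flag):
--     answer = []
--     for num, i in zip(arr, flag):
--         if i:
--             answer += [num] * (num * 2)
--         else:
--             answer = answer[:-num]
--     return answer
-- ===== SOURCE B (Python) =====
-- def solution(arr, flag):
--     # Run-length-encoded result: (value, count) blocks, newest last, plus total length.
--     # Additions push one block; the slice [:-num] is applied lazily by trimming block
--     # counts from the top; the list is materialised once at the end.
--     blocks = []
--     length = 0
--     for num, f in zip(arr, flag):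
--         if f:
--             count = 2 * num
--             if count > 0:
--                 blocks.append((num, count))
--                 length += count
--         else:
--             stop = -num           # slice endpoint of [:-num]
--             if stop < 0:
--                 stop += length
--             keep = min(max(stop, 0), length)
--             drop = length - keep
--             while drop > 0:
--                 value, count = blocks[-1]
--                 if count <= drop:
--                     blocks.pop()
--                     drop -= count
--                     length -= count
--                 else:
--                     blocks[-1] = (value, count - drop)
--                     length -= drop
--                     drop = 0
--     return [v for v, c in blocks for _ in range(c)]
-- ===== Notes on version B (the rewrite author's own statement) =====
-- stated objective: faster
-- what changed: Replaces A's materialised list (re-copied by every '+=' and every slice) with a run-length-encoded stack of (value,count) blocks plus a length counter; removals only trim block counts and the output list is expanded once at the end.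
import Mathlib
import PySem

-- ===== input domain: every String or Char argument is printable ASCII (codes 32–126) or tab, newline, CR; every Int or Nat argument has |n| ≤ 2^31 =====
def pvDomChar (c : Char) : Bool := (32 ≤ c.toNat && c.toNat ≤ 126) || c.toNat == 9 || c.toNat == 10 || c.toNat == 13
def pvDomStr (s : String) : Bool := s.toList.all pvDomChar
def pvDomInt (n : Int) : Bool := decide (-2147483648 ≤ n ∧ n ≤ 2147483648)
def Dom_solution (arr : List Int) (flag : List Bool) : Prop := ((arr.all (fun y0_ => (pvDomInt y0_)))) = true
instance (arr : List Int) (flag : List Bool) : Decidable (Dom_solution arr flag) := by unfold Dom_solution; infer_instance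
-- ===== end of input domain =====

-- B replaces A's per-step materialised list by a run-length-encoded block stack with a
-- length counter, applying each slice lazily and expanding once at the end (objective: faster).

-- ===== PORT A =====
-- literal port of A: fold over zip(arr, flag); [num]*(num*2) is pyRepeat, answer[:-num] is slice
def solution (arr : List Int) (flag : List Bool) : List Int :=
  (List.zip arr flag).foldl
    (fun answer p =>
      if p.2 then answer ++ PySem.List.pyRepeat [p.1] (p.1 * 2)
      else PySem.List.slice answer none (some (-p.1))) []

-- ===== PORT B =====
-- Source B's while-loop trimming the newest blocks: recursion on the block stack (newest first)
def truncBlocks : List (Int × Int) → Int → List (Int × Int)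
  | [], _ => []
  | (v, c) :: rest, drop =>
    if drop ≤ 0 then (v, c) :: rest
    else if c ≤ drop then truncBlocks rest (drop - c)
    else (v, c - drop) :: rest

def stepB (s : List (Int × Int) × Int) (p : Int × Bool) : List (Int × Int) × Int :=
  if p.2 then
    let count := 2 * p.1
    if 0 < count then ((p.1, count) :: s.1, s.2 + count) else s
  else
    let stop := -p.1
    let stop := if stop < 0 then stop + s.2 else stop
    let keep := min (max stop 0) s.2
    (truncBlocks s.1 (s.2 - keep), keep)

def solution_alt (arr : List Int) (flag : List Bool) : List Int :=
  let s := (List.zip arr flag).foldl stepB ([], 0)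
  s.1.reverse.flatMap (fun p => List.replicate p.2.toNat p.1)

-- ===== PRECONDITION & SPEC =====
def Spec_solution (arr : List Int) (flag : List Bool) (out : List Int) : Prop := out = solution_alt arr flag
instance (arr : List Int) (flag : List Bool) (out : List Int) : Decidable (Spec_solution arr flag out) := by unfold Spec_solution; infer_instance

-- ===== CLAIM (what is proved, stated in full; the proofs are below) =====
def Claim_equal_solution : Prop := ∀ (arr : List Int) (flag : List Bool), Dom_solution arr flag → Spec_solution arr flag (solution arr flag)

-- ===== LEMMAS AND PROOFS =====
def expandB (bs : List (Int × Int)) : List Int :=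
  bs.reverse.flatMap (fun p => List.replicate p.2.toNat p.1)

theorem expandB_nil : expandB [] = [] := rfl

theorem expandB_cons (v c : Int) (bs : List (Int × Int)) :
    expandB ((v, c) :: bs) = expandB bs ++ List.replicate c.toNat v := by
  simp [expandB]

-- truncating k elements from the end, on a positive-count block stack
theorem expandB_truncBlocks (bs : List (Int × Int)) (k : Int)
    (hpos : ∀ p ∈ bs, 0 < p.2) :
    expandB (truncBlocks bs k) = (expandB bs).take ((expandB bs).length - k.toNat) := by
  induction bs generalizing k with
  | nil => simp [truncBlocks, expandB_nil]
  | cons hd tl ih =>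
    obtain ⟨v, c⟩ := hd
    have hc : 0 < c := hpos (v, c) (by simp)
    have hpos' : ∀ p ∈ tl, 0 < p.2 := fun p hp => hpos p (by simp [hp])
    rw [truncBlocks]
    split_ifs with h0 h1
    · have : k.toNat = 0 := by omega
      simp [this, expandB_cons]
    · -- c ≤ k : whole head block dropped
      rw [ih (k - c) hpos', expandB_cons]
      rw [List.take_append]
      have hlen : (expandB tl).length + c.toNat - k.toNat ≤ (expandB tl).length := by omega
      have h2 : (expandB tl).length + c.toNat - k.toNat - (expandB tl).length = 0 := by omega
      have h3 : (expandB tl).length - (k - c).toNat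
          = (expandB tl).length + c.toNat - k.toNat := by omega
      simp [h2, h3, List.length_append]
    · -- 0 < k < c : head block shrinks
      rw [expandB_cons, expandB_cons, List.take_append]
      have h4 : (expandB tl).length + c.toNat - k.toNat - (expandB tl).length
          = (c - k).toNat := by omega
      have h5 : (expandB tl).length ≤ (expandB tl).length + c.toNat - k.toNat := by omega
      simp [List.length_append, h4, List.take_replicate, List.take_of_length_le h5,
        Nat.min_eq_left (by omega : (c - k).toNat ≤ c.toNat)]

theorem truncBlocks_pos (bs : List (Int × Int)) (k : Int)
    (hpos : ∀ p ∈ bs, 0 < p.2) : ∀ p ∈ truncBlocks bs k, 0 < p.2 := by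
  induction bs generalizing k with
  | nil => simp [truncBlocks]
  | cons hd tl ih =>
    obtain ⟨v, c⟩ := hd
    have hc : 0 < c := hpos (v, c) (by simp)
    have hpos' : ∀ p ∈ tl, 0 < p.2 := fun p hp => hpos p (by simp [hp])
    rw [truncBlocks]
    split_ifs with h0 h1
    · exact hpos
    · exact ih (k - c) hpos'
    · intro p hp
      rcases List.mem_cons.1 hp with h | h
      · subst h; simpa using by omega
      · exact hpos' p h

def InvAB (ans : List Int) (s : List (Int × Int) × Int) : Prop :=
  ans = expandB s.1 ∧ s.2 = (ans.length : Int) ∧ ∀ p ∈ s.1, 0 < p.2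

theorem stepAB (ans : List Int) (s : List (Int × Int) × Int) (p : Int × Bool)
    (h : InvAB ans s) :
    InvAB (if p.2 then ans ++ PySem.List.pyRepeat [p.1] (p.1 * 2)
           else PySem.List.slice ans none (some (-p.1))) (stepB s p) := by
  obtain ⟨he, hl, hpos⟩ := h
  obtain ⟨num, f⟩ := p
  cases f with
  | true =>
    have hs : stepB s (num, true)
        = (if 0 < 2 * num then ((num, 2 * num) :: s.1, s.2 + 2 * num) else s) := rfl
    rw [if_pos rfl, hs, PySem.List.pyRepeat_singleton]
    by_cases hc : 0 < 2 * num
    · rw [if_pos hc]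
      have hmul : num * 2 = 2 * num := by ring
      refine ⟨?_, ?_, ?_⟩
      · rw [expandB_cons, ← he, hmul]
      · have h2 : ((num * 2).toNat : Int) = 2 * num := by omega
        simp only [List.length_append, List.length_replicate]
        push_cast
        omega
      · intro q hq
        rcases List.mem_cons.1 hq with h | h
        · subst h; simpa using hc
        · exact hpos q h
    · rw [if_neg hc]
      have h0 : (num * 2).toNat = 0 := by omega
      rw [h0]
      exact ⟨by simpa using he, by simpa using hl, hpos⟩
  | false =>
    set keep := min (max (if -num < 0 then -num + s.2 else -num) 0) s.2 with hkeep
    have hs : stepB s (num, false) = (truncBlocks s.1 (s.2 - keep), keep) := rfl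
    rw [if_neg (by decide : ¬ (false = true)), hs]
    have hlen : 0 ≤ s.2 := by rw [hl]; positivity
    have htn : keep.toNat = PySem.List.clampIdx ans.length (-num) := by
      simp only [PySem.List.clampIdx]
      split_ifs with h1 <;> omega
    have hslice : PySem.List.slice ans none (some (-num)) = ans.take keep.toNat := by
      rw [htn]; simp [PySem.List.slice, PySem.List.clampIdx]
    refine ⟨?_, ?_, truncBlocks_pos _ _ hpos⟩
    · rw [hslice, expandB_truncBlocks _ _ hpos, ← he]
      congr 1
      omega
    · rw [hslice]
      simp only [List.length_take]
      omega

theorem fold_inv (ps : List (Int × Bool)) (ans : List Int) (s : List (Int × Int) × Int)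
    (h : InvAB ans s) :
    InvAB (ps.foldl (fun answer p =>
        if p.2 then answer ++ PySem.List.pyRepeat [p.1] (p.1 * 2)
        else PySem.List.slice answer none (some (-p.1))) ans)
      (ps.foldl stepB s) := by
  induction ps generalizing ans s with
  | nil => exact h
  | cons q qs ih => exact ih _ _ (stepAB ans s q h)

-- ===== VERDICT (by name: the statement is the Claim_ definition above) =====
theorem solution_spec : Claim_equal_solution := by
  intro arr flag _
  have h := fold_inv (List.zip arr flag) [] ([], 0) ⟨rfl, rfl, by simp⟩
  exact h.1
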